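-- pv_equiv track=rewrite | github.com/ianyhchen/LeetCode | solutions/Valid Elements in an Array.py | findValidElements
-- ===== SOURCE A (Python) =====
-- def findValidElements(nums: list[int]) -> list[int]:
--     n = len(nums)
--     if n == 1:
--         return nums
--
--     is_valid = [False] * n
--     is_valid[0], is_valid[n - 1] = True, True
--     left_max = nums[0]
--     right_max = nums[n - 1]
--     for i in range(1, n):
--         if nums[i] > left_max:
--             is_valid[i] = True
--             left_max = nums[i]
--     for i in range(n - 1, 0, -1):
--         if nums[i] > right_max:
--             is_valid[i] = True
--             right_max = nums[i]
--
--     return [nums[i] for i in range(n) if is_valid[i]]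
-- ===== SOURCE B (Python) =====
-- def findValidElements(nums: list[int]) -> list[int]:
--     return [x for i, x in enumerate(nums)
--             if all(y < x for y in nums[:i]) or all(y < x for y in nums[i + 1:])]
-- ===== Notes on version B (the rewrite author's own statement) =====
-- stated objective: simpler
-- what changed: Replaced the two marking sweeps over a mutable boolean array (plus endpoint pre-marking and an n==1 special case) by a single comprehension testing each element directly against its strict prefix and suffix via all(); Pre_ excludes only the empty list, on which A raises IndexError.
import Mathlib
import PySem

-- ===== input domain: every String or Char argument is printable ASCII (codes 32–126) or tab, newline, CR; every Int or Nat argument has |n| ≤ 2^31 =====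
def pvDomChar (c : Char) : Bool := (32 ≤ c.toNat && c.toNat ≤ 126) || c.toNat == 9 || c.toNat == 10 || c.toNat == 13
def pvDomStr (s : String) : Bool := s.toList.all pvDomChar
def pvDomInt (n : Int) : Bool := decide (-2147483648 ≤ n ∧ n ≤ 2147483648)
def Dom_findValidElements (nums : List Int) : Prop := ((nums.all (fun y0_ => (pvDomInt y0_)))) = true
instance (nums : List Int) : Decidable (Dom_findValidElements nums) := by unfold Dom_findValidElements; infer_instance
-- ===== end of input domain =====

-- B replaces A's two marking sweeps over a mutable boolean array by one comprehension testing
-- each element against its strict prefix and suffix (simpler decomposition, not faster).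

-- ===== PORT A =====
def findValidElements (nums : List Int) : List Int :=
  let n : Int := nums.length
  if n = 1 then nums else
  let is_valid : List Bool :=
    ((List.replicate nums.length false).set 0 true).set (nums.length - 1) true
  let left_max : Int := PySem.List.pyGetD nums 0 0
  let right_max : Int := PySem.List.pyGetD nums (n - 1) 0
  let s1 := (PySem.List.pyRange 1 n 1).foldl
      (fun (s : List Bool × Int) i =>
        if s.2 < PySem.List.pyGetD nums i 0 then
          (s.1.set i.toNat true, PySem.List.pyGetD nums i 0)
        else s)
      (is_valid, left_max)
  let s2 := (PySem.List.pyRange (n - 1) 0 (-1)).foldl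
      (fun (s : List Bool × Int) i =>
        if s.2 < PySem.List.pyGetD nums i 0 then
          (s.1.set i.toNat true, PySem.List.pyGetD nums i 0)
        else s)
      (s1.1, right_max)
  (PySem.List.pyRange 0 n 1).foldl
      (fun acc i =>
        if PySem.List.pyGetD s2.1 i false then acc ++ [PySem.List.pyGetD nums i 0] else acc)
      []

-- ===== PORT B =====
def findValidElements_alt (nums : List Int) : List Int :=
  ((PySem.List.enumerate nums 0).filter (fun p =>
      (PySem.List.slice nums none (some p.1)).all (fun y => decide (y < p.2)) ||
      (PySem.List.slice nums (some (p.1 + 1)) none).all (fun y => decide (y < p.2)))).map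
    (fun p => p.2)

-- ===== PRECONDITION & SPEC =====
-- Pre_ excludes only the empty list, on which A raises IndexError (is_valid[0] = True).
def Pre_findValidElements (nums : List Int) : Prop := nums ≠ []
instance (nums : List Int) : Decidable (Pre_findValidElements nums) := by
  unfold Pre_findValidElements; infer_instance

def pvWitness_findValidElements : List Int := [3, 1]

def Spec_findValidElements (nums : List Int) (out : List Int) : Prop :=
  out = findValidElements_alt nums
instance (nums : List Int) (out : List Int) : Decidable (Spec_findValidElements nums out) := by
  unfold Spec_findValidElements; infer_instance

-- ===== CLAIM =====
def Claim_equal_findValidElements : Prop :=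
  ∀ (nums : List Int), Dom_findValidElements nums → Pre_findValidElements nums →
    Spec_findValidElements nums (findValidElements nums)

-- ===== LEMMAS AND PROOFS =====

-- "nums[i] beats its strict prefix" / "beats its strict suffix", and the common selection.
def pvP (nums : List Int) (i : Nat) : Bool :=
  (nums.take i).all (fun y => decide (y < nums.getD i 0))
def pvS (nums : List Int) (i : Nat) : Bool :=
  (nums.drop (i + 1)).all (fun y => decide (y < nums.getD i 0))
def pvPred (nums : List Int) (i : Nat) : Bool := pvP nums i || pvS nums i
def pvSel (nums : List Int) : List Int :=
  ((List.range nums.length).filter (pvPred nums)).map (fun i => nums.getD i 0)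

def pvMxT (nums : List Int) (a : Nat) : Int := (nums.take a).foldl max (nums.getD 0 0)
def pvMxD (nums : List Int) (b : Nat) : Int :=
  (nums.drop b).foldl max (nums.getD (nums.length - 1) 0)

theorem pv_foldl_max_pull (l : List Int) (a b : Int) :
    l.foldl max (max a b) = max a (l.foldl max b) := by
  induction l generalizing b with
  | nil => rfl
  | cons x l ih =>
    simp only [List.foldl_cons]
    rw [show max (max a b) x = max a (max b x) by omega, ih]

theorem pv_gt_foldl_max_iff (l : List Int) (a x : Int) :
    l.foldl max a < x ↔ a < x ∧ ∀ y ∈ l, y < x := by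
  induction l generalizing a with
  | nil => simp
  | cons z l ih =>
    simp only [List.foldl_cons, ih, max_lt_iff, List.mem_cons]
    constructor
    · rintro ⟨⟨h1, h2⟩, h3⟩; exact ⟨h1, fun y hy => by rcases hy with rfl | hy; exact h2; exact h3 y hy⟩
    · rintro ⟨h1, h2⟩; exact ⟨⟨h1, h2 z (.inl rfl)⟩, fun y hy => h2 y (.inr hy)⟩

theorem pvMxT_succ (nums : List Int) (a : Nat) (ha : a < nums.length) :
    pvMxT nums (a + 1) = max (pvMxT nums a) (nums.getD a 0) := by
  unfold pvMxT
  rw [List.take_add_one, List.getElem?_eq_getElem ha, List.foldl_append]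
  simp only [Option.toList_some, List.foldl_cons, List.foldl_nil]
  rw [show nums.getD a 0 = nums[a] from by
    simp [List.getD_eq_getElem?_getD, List.getElem?_eq_getElem ha]]

theorem pvMxD_eq (nums : List Int) (b : Nat) (hb : b < nums.length) :
    pvMxD nums b = max (nums.getD b 0) (pvMxD nums (b + 1)) := by
  have hg : nums.getD b 0 = nums[b] := by
    simp [List.getD_eq_getElem?_getD, List.getElem?_eq_getElem hb]
  unfold pvMxD
  set m := nums.getD (nums.length - 1) 0 with hm
  rw [List.drop_eq_getElem_cons hb, hg]
  simp only [List.foldl_cons]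
  rw [max_comm m nums[b], pv_foldl_max_pull]

theorem pvC1 (nums : List Int) (a : Nat) (ha1 : 1 ≤ a) (ha : a < nums.length) :
    (pvMxT nums a < nums.getD a 0) ↔ pvP nums a = true := by
  have hmem : nums.getD 0 0 ∈ nums.take a := by
    have h0 : 0 < nums.length := by omega
    have ht : 0 < (nums.take a).length := by simp; omega
    refine List.mem_iff_getElem.mpr ⟨0, ht, ?_⟩
    rw [List.getElem_take]
    simp [List.getD_eq_getElem?_getD, List.getElem?_eq_getElem h0]
  unfold pvMxT pvP
  rw [pv_gt_foldl_max_iff]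
  simp only [List.all_eq_true, decide_eq_true_eq]
  exact ⟨fun ⟨_, h⟩ => h, fun h => ⟨h _ hmem, h⟩⟩

theorem pvC2 (nums : List Int) (b : Nat) (hb1 : 1 ≤ b) (hb : b ≤ nums.length - 1)
    (hn : 1 ≤ nums.length) :
    (pvMxD nums (b + 1) < nums.getD b 0) ↔ (b < nums.length - 1 ∧ pvS nums b = true) := by
  unfold pvMxD pvS
  rw [pv_gt_foldl_max_iff]
  simp only [List.all_eq_true, decide_eq_true_eq]
  by_cases hcase : b < nums.length - 1
  · have hlast : nums.getD (nums.length - 1) 0 ∈ nums.drop (b + 1) := by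
      have h1 : nums.length - 1 < nums.length := by omega
      have hlen : nums.length - 1 - (b + 1) < (nums.drop (b + 1)).length := by simp; omega
      refine List.mem_iff_getElem.mpr ⟨nums.length - 1 - (b + 1), hlen, ?_⟩
      rw [List.getElem_drop]
      simp [List.getD_eq_getElem?_getD, List.getElem?_eq_getElem h1,
        show b + 1 + (nums.length - 1 - (b + 1)) = nums.length - 1 by omega]
    constructor
    · rintro ⟨_, h⟩; exact ⟨hcase, h⟩
    · rintro ⟨_, h⟩; exact ⟨h _ hlast, h⟩
  · have hb' : b = nums.length - 1 := by omega
    subst hb'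
    simp [List.drop_eq_nil_of_le (by omega : nums.length ≤ nums.length - 1 + 1)]

def pvLoopFold (nums : List Int) (lo hi stp : Int) (st : List Bool × Int) : List Bool × Int :=
  (PySem.List.pyRange lo hi stp).foldl
    (fun (s : List Bool × Int) i =>
      if s.2 < PySem.List.pyGetD nums i 0 then
        (s.1.set i.toNat true, PySem.List.pyGetD nums i 0)
      else s) st

theorem pvLoopFold_eq (nums : List Int) (lo hi stp : Int) (st : List Bool × Int) :
    (PySem.List.pyRange lo hi stp).foldl
      (fun (s : List Bool × Int) i =>
        if s.2 < PySem.List.pyGetD nums i 0 then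
          (s.1.set i.toNat true, PySem.List.pyGetD nums i 0)
        else s) st = pvLoopFold nums lo hi stp st := rfl

theorem pvLoop1 (nums : List Int) (k : Nat) : ∀ (a : Nat) (v : List Bool),
    a + k = nums.length → 1 ≤ a → v.length = nums.length →
    (pvLoopFold nums (a : Int) (nums.length : Int) 1 (v, pvMxT nums a)).1.length = nums.length ∧
    ∀ i : Nat, (pvLoopFold nums (a : Int) (nums.length : Int) 1 (v, pvMxT nums a)).1.getD i false =
      (v.getD i false || (decide (a ≤ i) && decide (i < nums.length) && pvP nums i)) := by
  induction k with
  | zero =>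
    intro a v hk ha hv
    unfold pvLoopFold
    rw [PySem.List.pyRange_one_eq_nil (by exact_mod_cast (by omega : nums.length ≤ a))]
    refine ⟨hv, fun i => ?_⟩
    have hfalse : (decide (a ≤ i) && decide (i < nums.length)) = false := by
      rcases Nat.lt_or_ge i nums.length with h | h
      · simp; omega
      · simp; omega
    simp only [List.foldl_nil, Bool.and_assoc] at *
    rw [← Bool.and_assoc, hfalse]
    simp
  | succ k ih =>
    intro a v hk ha hv
    have haN : a < nums.length := by omega
    have halt : (a : Int) < (nums.length : Int) := by exact_mod_cast haN
    have hpg : PySem.List.pyGetD nums (a : Int) 0 = nums.getD a 0 := by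
      simp [PySem.List.pyGetD_natCast]
    have hcast : ((a : Int) + 1) = ((a + 1 : Nat) : Int) := by push_cast; ring
    unfold pvLoopFold
    rw [PySem.List.pyRange_one_cons halt]
    simp only [List.foldl_cons, hpg, Int.toNat_natCast]
    by_cases hcond : pvMxT nums a < nums.getD a 0
    · rw [if_pos hcond]
      have hmx : nums.getD a 0 = pvMxT nums (a + 1) := by
        rw [pvMxT_succ nums a haN]; omega
      have hP : pvP nums a = true := (pvC1 nums a ha haN).mp hcond
      rw [hmx, hcast]
      obtain ⟨ihlen, ihget⟩ := ih (a + 1) (v.set a true) (by omega) (by omega) (by simp [hv])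
      unfold pvLoopFold at ihlen ihget
      refine ⟨ihlen, fun i => ?_⟩
      rw [ihget i]
      have hset : (v.set a true).getD i false = if a = i then true else v.getD i false := by
        rw [List.getD_eq_getElem?_getD, List.getElem?_set]
        by_cases hai : a = i
        · simp [hai, show i < v.length by omega]
        · simp [hai, List.getD_eq_getElem?_getD]
      rw [hset]
      by_cases hai : a = i
      · subst hai
        simp [hP, haN]
      · have hd : decide (a < i) = decide (a ≤ i) := by
          by_cases h : a ≤ i
          · simp [h, show a < i by omega]
          · simp [h, show ¬ a < i by omega]
        simp [hai, hd]
    · rw [if_neg hcond]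
      have hmx : pvMxT nums a = pvMxT nums (a + 1) := by
        rw [pvMxT_succ nums a haN]; omega
      have hP : pvP nums a = false := by
        rcases Bool.eq_false_or_eq_true (pvP nums a) with h | h
        · exact absurd ((pvC1 nums a ha haN).mpr h) hcond
        · exact h
      rw [hmx, hcast]
      obtain ⟨ihlen, ihget⟩ := ih (a + 1) v (by omega) (by omega) hv
      unfold pvLoopFold at ihlen ihget
      refine ⟨ihlen, fun i => ?_⟩
      rw [ihget i]
      by_cases hai : a = i
      · subst hai
        simp [hP]
      · have hd : decide (a < i) = decide (a ≤ i) := by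
          by_cases h : a ≤ i
          · simp [h, show a < i by omega]
          · simp [h, show ¬ a < i by omega]
        simp [hd]

theorem pvLoop2 (nums : List Int) : ∀ (b : Nat) (v : List Bool),
    b ≤ nums.length - 1 → 1 ≤ nums.length → v.length = nums.length →
    (pvLoopFold nums (b : Int) 0 (-1) (v, pvMxD nums (b + 1))).1.length = nums.length ∧
    ∀ i : Nat, (pvLoopFold nums (b : Int) 0 (-1) (v, pvMxD nums (b + 1))).1.getD i false =
      (v.getD i false ||
        (decide (1 ≤ i) && decide (i ≤ b) && decide (i < nums.length - 1) && pvS nums i)) := by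
  intro b
  induction b with
  | zero =>
    intro v hb hn hv
    unfold pvLoopFold
    rw [show ((0:Nat):Int) = (0:Int) from by simp,
      PySem.List.pyRange_neg_one_eq_nil (by omega : (0:Int) ≤ 0)]
    refine ⟨hv, fun i => ?_⟩
    have hfalse : (decide (1 ≤ i) && decide (i ≤ 0)) = false := by
      by_cases h : 1 ≤ i
      · simp [h]; omega
      · simp [h]
    simp only [List.foldl_nil, Bool.and_assoc] at *
    rw [← Bool.and_assoc, hfalse]
    simp
  | succ b ihb =>
    intro v hb hn hv
    have hbN : b + 1 < nums.length := by omega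
    have hpg : PySem.List.pyGetD nums ((b + 1 : Nat) : Int) 0 = nums.getD (b + 1) 0 := by
      rw [PySem.List.pyGetD_natCast]
    unfold pvLoopFold
    rw [PySem.List.pyRange_neg_one_cons (by exact_mod_cast (by omega : (0:Nat) < b + 1))]
    simp only [List.foldl_cons, hpg, Int.toNat_natCast]
    have hcast : ((b + 1 : Nat) : Int) - 1 = ((b : Nat) : Int) := by push_cast; ring
    rw [hcast]
    have hC2 := pvC2 nums (b + 1) (by omega) (by omega) hn
    by_cases hcond : pvMxD nums (b + 1 + 1) < nums.getD (b + 1) 0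
    · rw [if_pos hcond]
      obtain ⟨hlt, hS⟩ := hC2.mp hcond
      have hmx : nums.getD (b + 1) 0 = pvMxD nums (b + 1) := by
        rw [pvMxD_eq nums (b + 1) hbN]; omega
      rw [hmx]
      obtain ⟨ihlen, ihget⟩ := ihb (v.set (b + 1) true) (by omega) hn (by simp [hv])
      unfold pvLoopFold at ihlen ihget
      refine ⟨ihlen, fun i => ?_⟩
      rw [ihget i]
      have hset : (v.set (b + 1) true).getD i false =
          if b + 1 = i then true else v.getD i false := by
        rw [List.getD_eq_getElem?_getD, List.getElem?_set]
        by_cases hai : b + 1 = i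
        · simp [hai, show i < v.length by omega]
        · simp [hai, List.getD_eq_getElem?_getD]
      rw [hset]
      by_cases hai : b + 1 = i
      · subst hai
        simp [hS, hlt]
      · have hd : decide (i ≤ b) = decide (i ≤ b + 1) := by
          by_cases h : i ≤ b
          · simp [h, show i ≤ b + 1 by omega]
          · simp [h, show ¬ i ≤ b + 1 by omega]
        simp [hai, hd]
    · rw [if_neg hcond]
      have hmx : pvMxD nums (b + 1 + 1) = pvMxD nums (b + 1) := by
        rw [pvMxD_eq nums (b + 1) hbN]; omega
      rw [hmx]
      obtain ⟨ihlen, ihget⟩ := ihb v (by omega) hn hv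
      unfold pvLoopFold at ihlen ihget
      refine ⟨ihlen, fun i => ?_⟩
      rw [ihget i]
      by_cases hai : b + 1 = i
      · subst hai
        have hfalse : (decide (b + 1 < nums.length - 1) && pvS nums (b + 1)) = false := by
          by_cases h1 : b + 1 < nums.length - 1
          · rcases Bool.eq_false_or_eq_true (pvS nums (b + 1)) with h2 | h2
            · exact absurd (hC2.mpr ⟨h1, h2⟩) hcond
            · simp [h2]
          · simp [h1]
        simp only [Bool.and_assoc]
        rw [show (decide (1 ≤ b + 1) && (decide (b + 1 ≤ b + 1) &&
          (decide (b + 1 < nums.length - 1) && pvS nums (b + 1)))) =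
          (decide (b + 1 < nums.length - 1) && pvS nums (b + 1)) by simp, hfalse]
        simp [show ¬ (b + 1 ≤ b) by omega]
      · have hd : decide (i ≤ b) = decide (i ≤ b + 1) := by
          by_cases h : i ≤ b
          · simp [h, show i ≤ b + 1 by omega]
          · simp [h, show ¬ i ≤ b + 1 by omega]
        simp [hd]

theorem pvB_eq_sel (nums : List Int) : findValidElements_alt nums = pvSel nums := by
  unfold findValidElements_alt pvSel pvPred pvP pvS
  rw [PySem.List.enumerate_eq_map_pyRange nums 0]
  rw [show PySem.List.len nums = (nums.length : Int) by simp]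
  rw [PySem.List.pyRange_zero_natCast, List.filter_map, List.filter_map, List.map_map]
  rw [List.filter_congr (q := fun k => pvPred nums k)]
  · rw [List.map_map]
    apply List.map_congr_left
    intro k hk
    simp
  · intro k hk
    simp only [Function.comp_def]
    rw [show ((k:Int) + 1) = ((k+1 : Nat) : Int) by push_cast; ring,
      PySem.List.slice_from_natCast, PySem.List.slice_to_natCast]
    simp [pvPred, pvP, pvS]

theorem pvMxT_one (nums : List Int) (h : nums ≠ []) : pvMxT nums 1 = nums.getD 0 0 := by
  cases nums with
  | nil => simp at h
  | cons x xs => simp [pvMxT]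

theorem pvMxD_len (nums : List Int) : pvMxD nums nums.length = nums.getD (nums.length - 1) 0 := by
  simp [pvMxD]

theorem pv_v0_get (n i : Nat) (hn : 1 ≤ n) :
    (((List.replicate n false).set 0 true).set (n - 1) true).getD i false =
      (decide (i < n) && (decide (i = 0) || decide (i = n - 1))) := by
  rw [List.getD_eq_getElem?_getD, List.getElem?_set, List.getElem?_set]
  by_cases h1 : i = n - 1
  · subst h1
    simp [show n - 1 < n by omega]
  · have h1' : ¬ (n - 1 = i) := fun hh => h1 hh.symm
    by_cases h2 : i = 0
    · subst h2
      simp [show (0:Nat) < n by omega, h1', h1]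
    · have h2' : ¬ (0 = i) := fun hh => h2 hh.symm
      by_cases h3 : i < n
      · simp [h1', h2', h1, h2, h3]
      · simp [h1', h2', h1, h2, h3]

theorem pvFinalBool (nums : List Int) (i : Nat) (hi : i < nums.length) (hn : 2 ≤ nums.length) :
    ((decide (i < nums.length) && (decide (i = 0) || decide (i = nums.length - 1))) ||
      (decide (1 ≤ i) && decide (i < nums.length) && pvP nums i) ||
      (decide (1 ≤ i) && decide (i ≤ nums.length - 1) && decide (i < nums.length - 1) &&
        pvS nums i)) = pvPred nums i := by
  by_cases h0 : i = 0
  · subst h0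
    simp [pvPred, pvP, hi]
  · by_cases hl : i = nums.length - 1
    · subst hl
      have hS : pvS nums (nums.length - 1) = true := by
        unfold pvS
        rw [show nums.length - 1 + 1 = nums.length by omega, List.drop_length]
        simp
      simp [pvPred, hS, hi]
    · have h1 : 1 ≤ i := by omega
      have h2 : i < nums.length - 1 := by omega
      simp [pvPred, h0, hl, h1, h2, hi, show i ≤ nums.length - 1 by omega]

theorem pvA_eq_sel (nums : List Int) (h : nums ≠ []) : findValidElements nums = pvSel nums := by
  have hn1 : 1 ≤ nums.length := List.length_pos_of_ne_nil h
  by_cases h1 : nums.length = 1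
  · obtain ⟨x, rfl⟩ : ∃ x, nums = [x] := by
      cases nums with
      | nil => simp at h1
      | cons x xs =>
        cases xs with
        | nil => exact ⟨x, rfl⟩
        | cons y ys => simp at h1
    simp [findValidElements, pvSel, pvPred, pvP, pvS, List.filter, List.range_succ]
  · have hn2 : 2 ≤ nums.length := by omega
    have hif : ¬((nums.length : Int) = 1) := by
      intro hh
      exact h1 (by exact_mod_cast hh)
    have hvlen : (((List.replicate nums.length false).set 0 true).set
        (nums.length - 1) true).length = nums.length := by simp
    unfold findValidElements
    simp only [if_neg hif]
    rw [pvLoopFold_eq, pvLoopFold_eq]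
    rw [show PySem.List.pyGetD nums 0 0 = pvMxT nums 1 by
      rw [PySem.List.pyGetD_zero, pvMxT_one nums h]]
    rw [show ((nums.length : Int) - 1) = ((nums.length - 1 : Nat) : Int) by omega]
    rw [show PySem.List.pyGetD nums ((nums.length - 1 : Nat) : Int) 0 =
        pvMxD nums (nums.length - 1 + 1) by
      rw [PySem.List.pyGetD_natCast, show nums.length - 1 + 1 = nums.length by omega, pvMxD_len]]
    obtain ⟨hlen1, hget1⟩ := pvLoop1 nums (nums.length - 1)
      1 (((List.replicate nums.length false).set 0 true).set (nums.length - 1) true)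
      (by omega) (by omega) hvlen
    simp only [Nat.cast_one] at hlen1 hget1
    obtain ⟨hlen2, hget2⟩ := pvLoop2 nums (nums.length - 1)
      ((pvLoopFold nums (1 : Int) (nums.length : Int) 1
        ((((List.replicate nums.length false).set 0 true).set (nums.length - 1) true),
          pvMxT nums 1)).1) (le_refl _) hn1 hlen1
    rw [PySem.List.foldl_append_if]
    rw [List.nil_append, PySem.List.pyRange_zero_natCast, List.filter_map, List.map_map]
    unfold pvSel
    rw [List.filter_congr (q := pvPred nums) ?_]
    · apply List.map_congr_left
      intro k hk
      simp
    · intro k hk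
      have hklen : k < nums.length := List.mem_range.mp hk
      simp only [Function.comp_apply, PySem.List.pyGetD_natCast]
      rw [hget2 k, hget1 k, pv_v0_get nums.length k hn1, ← pvFinalBool nums k hklen hn2]


-- ===== VERDICT =====
theorem findValidElements_spec : Claim_equal_findValidElements := by
  intro nums _ hpre
  unfold Spec_findValidElements
  rw [pvA_eq_sel nums hpre, pvB_eq_sel nums]
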